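-- pv_equiv track=rewrite | github.com/xjfcnfw3/algorithm | programers/미로_탈출_명령어.py | solution
-- ===== SOURCE A (Python) =====
-- dx = [1, 0, 0, -1]
--
-- dy = [0, -1, 1, 0]
--
-- directions = ['d', 'l', 'r', 'u']
--
-- def solution(n, m, x, y, r, c, k):
--     result = []
--     flag = [False]
--
--     def dfs(X, Y, deep, path):
--         if flag[0] or abs(X - r) + abs(Y - c) + deep > k:
--             return
--
--         if deep == k:
--             if (X, Y) == (r, c):
--                 result.append(path)
--                 flag[0] = True
--             return
--
--         for i in range(4):
--             NX = X + dx[i]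
--             NY = Y + dy[i]
--             if 0 < NX <= n and 0 < NY <= m:
--                 dfs(NX, NY, deep + 1, path + directions[i])
--
--     z = k - abs(x - r) + abs(y - c)
--     if z < 0 or z % 2 != 0:
--         return 'impossible'
--
--     dfs(x, y, 0, '')
--
--     if result:
--         return result[0]
--
--     return "impossible"
-- ===== SOURCE B (Python) =====
-- def solution(n, m, x, y, r, c, k):
--     d0 = abs(x - r) + abs(y - c)
--     if k < d0 or (k - d0) % 2 != 0:
--         return 'impossible'
--     if k == 0:
--         return ''
--     if not (0 < r <= n and 0 < c <= m):
--         return 'impossible'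
--
--     def ok(X, Y, rem):
--         d = abs(X - r) + abs(Y - c)
--         return d <= rem and (rem - d) % 2 == 0 and (rem == d or n > 1 or m > 1)
--
--     out = ''
--     X, Y = x, y
--     for rem in range(k - 1, -1, -1):
--         for ch, NX, NY in (('d', X + 1, Y), ('l', X, Y - 1), ('r', X, Y + 1), ('u', X - 1, Y)):
--             if 0 < NX <= n and 0 < NY <= m and ok(NX, NY, rem):
--                 out += ch
--                 X, Y = NX, NY
--                 break
--         else:
--             return 'impossible'
--     return out
-- ===== Notes on version B (the rewrite author's own statement) =====
-- stated objective: alternative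
-- what changed: Replaces the backtracking DFS with result/flag state by a greedy single pass: at each of the k steps it takes the first direction (d,l,r,u) whose cell stays inside the grid and keeps (r,c) exactly reachable by a Manhattan-distance + parity feasibility test, so no backtracking ever happens.
import Mathlib
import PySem

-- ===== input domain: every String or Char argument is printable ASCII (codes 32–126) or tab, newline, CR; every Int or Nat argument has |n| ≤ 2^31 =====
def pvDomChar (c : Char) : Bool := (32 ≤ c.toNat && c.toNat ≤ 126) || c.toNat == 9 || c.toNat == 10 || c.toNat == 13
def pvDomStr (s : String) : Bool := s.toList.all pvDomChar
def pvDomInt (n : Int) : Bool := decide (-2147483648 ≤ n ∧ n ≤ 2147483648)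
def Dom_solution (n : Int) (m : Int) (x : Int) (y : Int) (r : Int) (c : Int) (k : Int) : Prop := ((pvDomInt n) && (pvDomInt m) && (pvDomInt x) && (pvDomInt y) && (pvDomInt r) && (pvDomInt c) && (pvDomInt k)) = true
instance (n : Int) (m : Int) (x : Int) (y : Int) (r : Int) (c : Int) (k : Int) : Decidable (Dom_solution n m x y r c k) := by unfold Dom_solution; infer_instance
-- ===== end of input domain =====

-- B replaces A's backtracking DFS by a greedy walk without backtracking (it takes the first direction
-- that keeps the target reachable by Manhattan distance + parity); same return value everywhere.

-- ===== PORT A =====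
-- dx, dy, directions zipped: (dx[i], dy[i], directions[i]) for i in range(4)
def pvDirsA : List (Int × Int × String) := [(1, 0, "d"), (0, -1, "l"), (0, 1, "r"), (-1, 0, "u")]

-- A's nested dfs; the pair is the Python state (result, flag[0]); fuel = k + 1 - deep is never
-- exhausted while A's dfs recurses, because dfs returns at deep == k.
def pvDfsA (n m r c k : Int) : Nat → Int → Int → Int → String → List String × Bool → List String × Bool
  | 0, _, _, _, _, st => st
  | fuel + 1, X, Y, deep, path, st =>
    if st.2 ∨ k < |X - r| + |Y - c| + deep then st
    else if deep = k then
      (if X = r ∧ Y = c then (st.1 ++ [path], true) else st)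
    else
      pvDirsA.foldl (fun s p =>
        if 0 < X + p.1 ∧ X + p.1 ≤ n ∧ 0 < Y + p.2.1 ∧ Y + p.2.1 ≤ m then
          pvDfsA n m r c k fuel (X + p.1) (Y + p.2.1) (deep + 1) (path ++ p.2.2) s
        else s) st

def solution (n : Int) (m : Int) (x : Int) (y : Int) (r : Int) (c : Int) (k : Int) : String :=
  if k - |x - r| + |y - c| < 0 ∨ PySem.Int.mod (k - |x - r| + |y - c|) 2 ≠ 0 then "impossible"
  else
    match (pvDfsA n m r c k (k.toNat + 1) x y 0 "" ([], false)).1 with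
    | p :: _ => p
    | [] => "impossible"

-- ===== PORT B =====
-- ok(X, Y, rem): can a length-rem walk inside the grid end at (r, c) from in-bounds (X, Y)?
def pvOkB (n m r c : Int) (X Y rem : Int) : Bool :=
  decide (|X - r| + |Y - c| ≤ rem) &&
  decide (PySem.Int.mod (rem - (|X - r| + |Y - c|)) 2 = 0) &&
  (decide (rem = |X - r| + |Y - c|) || decide (1 < n) || decide (1 < m))

-- the greedy loop: out accumulates the answer; rem counts the remaining moves
def pvGoB (n m r c : Int) : Nat → Int → Int → String → Option String
  | 0, _, _, out => some out
  | rem + 1, X, Y, out =>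
    match [("d", X + 1, Y), ("l", X, Y - 1), ("r", X, Y + 1), ("u", X - 1, Y)].find?
        (fun t => decide (0 < t.2.1 ∧ t.2.1 ≤ n ∧ 0 < t.2.2 ∧ t.2.2 ≤ m) &&
                  pvOkB n m r c t.2.1 t.2.2 rem) with
    | some t => pvGoB n m r c rem t.2.1 t.2.2 (out ++ t.1)
    | none => none

def solution_alt (n : Int) (m : Int) (x : Int) (y : Int) (r : Int) (c : Int) (k : Int) : String :=
  if k < |x - r| + |y - c| ∨ PySem.Int.mod (k - (|x - r| + |y - c|)) 2 ≠ 0 then "impossible"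
  else if k = 0 then ""
  else if ¬(0 < r ∧ r ≤ n ∧ 0 < c ∧ c ≤ m) then "impossible"
  else
    match pvGoB n m r c k.toNat x y "" with
    | some s => s
    | none => "impossible"

-- ===== PRECONDITION & SPEC =====
def Spec_solution (n : Int) (m : Int) (x : Int) (y : Int) (r : Int) (c : Int) (k : Int) (out : String) : Prop := out = solution_alt n m x y r c k
instance (n : Int) (m : Int) (x : Int) (y : Int) (r : Int) (c : Int) (k : Int) (out : String) : Decidable (Spec_solution n m x y r c k out) := by unfold Spec_solution; infer_instance

-- ===== CLAIM (what is proved, stated in full; the proofs are below) =====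
def Claim_equal_solution : Prop := ∀ (n : Int) (m : Int) (x : Int) (y : Int) (r : Int) (c : Int) (k : Int), Dom_solution n m x y r c k → Spec_solution n m x y r c k (solution n m x y r c k)

-- ===== LEMMAS AND PROOFS =====

-- proof-side variant of pvGoB that re-checks arrival at rem = 0 (pvGoB may omit the check because it
-- is only called on cells pvOkB has approved); it matches pvDfsA's shape exactly.
def pvGd (n m r c : Int) : Nat → Int → Int → String → Option String
  | 0, X, Y, out => if X = r ∧ Y = c then some out else none
  | rem + 1, X, Y, out =>
    match [("d", X + 1, Y), ("l", X, Y - 1), ("r", X, Y + 1), ("u", X - 1, Y)].find?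
        (fun t => decide (0 < t.2.1 ∧ t.2.1 ≤ n ∧ 0 < t.2.2 ∧ t.2.2 ≤ m) &&
                  pvOkB n m r c t.2.1 t.2.2 rem) with
    | some t => pvGd n m r c rem t.2.1 t.2.2 (out ++ t.1)
    | none => none

lemma okB_iff (n m r c X Y rem : Int) :
    pvOkB n m r c X Y rem = true ↔
      (((X-r).natAbs : Int) + (Y-c).natAbs ≤ rem ∧
       (rem - (((X-r).natAbs : Int) + (Y-c).natAbs)) % 2 = 0 ∧
       (rem = ((X-r).natAbs : Int) + (Y-c).natAbs ∨ 1 < n ∨ 1 < m)) := by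
  simp only [pvOkB, Bool.and_eq_true, Bool.or_eq_true, decide_eq_true_eq,
    PySem.Int.mod_eq_emod_of_pos (show (0:Int) < 2 by norm_num), Int.abs_eq_natAbs]
  tauto


lemma pvDfsA_flag (n m r c k : Int) : ∀ (fuel : Nat) (X Y deep : Int) (path : String) (l : List String),
    pvDfsA n m r c k fuel X Y deep path (l, true) = (l, true) := by
  intro fuel X Y deep path l
  cases fuel with
  | zero => rfl
  | succ f => simp [pvDfsA]

lemma pvGd_eq_goB (n m r c : Int) : ∀ (rem : Nat) (X Y : Int) (acc : String),
    pvGd n m r c (rem + 1) X Y acc = pvGoB n m r c (rem + 1) X Y acc := by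
  intro rem
  induction rem with
  | zero =>
    intro X Y acc
    rw [pvGd, pvGoB]
    cases h : [("d", X + 1, Y), ("l", X, Y - 1), ("r", X, Y + 1), ("u", X - 1, Y)].find?
        (fun t => decide (0 < t.2.1 ∧ t.2.1 ≤ n ∧ 0 < t.2.2 ∧ t.2.2 ≤ m) &&
                  pvOkB n m r c t.2.1 t.2.2 ((0:Nat))) with
    | none => rfl
    | some t =>
      have hp := List.find?_some h
      simp only [Bool.and_eq_true] at hp
      have hok := (okB_iff n m r c t.2.1 t.2.2 0).mp hp.2
      have h1 : t.2.1 = r ∧ t.2.2 = c := by omega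
      simp [pvGd, pvGoB, h1.1, h1.2]
  | succ rem ih =>
    intro X Y acc
    rw [pvGd, pvGoB]
    cases h : [("d", X + 1, Y), ("l", X, Y - 1), ("r", X, Y + 1), ("u", X - 1, Y)].find?
        (fun t => decide (0 < t.2.1 ∧ t.2.1 ≤ n ∧ 0 < t.2.2 ∧ t.2.2 ≤ m) &&
                  pvOkB n m r c t.2.1 t.2.2 ((rem+1 : Nat))) with
    | none => rfl
    | some t => exact ih t.2.1 t.2.2 (acc ++ t.1)
lemma childStep (n m r c X Y : Int) (rem : Nat)
    (htb : 0 < r ∧ r ≤ n ∧ 0 < c ∧ c ≤ m)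
    (hb : 0 < X ∧ X ≤ n ∧ 0 < Y ∧ Y ≤ m)
    (hok : pvOkB n m r c X Y ((rem : Int) + 1) = true) :
    ∃ t ∈ [("d", X + 1, Y), ("l", X, Y - 1), ("r", X, Y + 1), ("u", X - 1, Y)],
      (decide (0 < t.2.1 ∧ t.2.1 ≤ n ∧ 0 < t.2.2 ∧ t.2.2 ≤ m) &&
       pvOkB n m r c t.2.1 t.2.2 (rem : Int)) = true := by
  rw [okB_iff] at hok
  rcases lt_trichotomy X r with hx | hx | hx
  · refine ⟨("d", X + 1, Y), by simp, ?_⟩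
    simp only [Bool.and_eq_true, decide_eq_true_eq]; rw [okB_iff]; omega
  · rcases lt_trichotomy Y c with hy | hy | hy
    · refine ⟨("r", X, Y + 1), by simp, ?_⟩
      simp only [Bool.and_eq_true, decide_eq_true_eq]; rw [okB_iff]; omega
    · by_cases hXn : X < n
      · refine ⟨("d", X + 1, Y), by simp, ?_⟩
        simp only [Bool.and_eq_true, decide_eq_true_eq]; rw [okB_iff]; omega
      · by_cases hX1 : 1 < X
        · refine ⟨("u", X - 1, Y), by simp, ?_⟩
          simp only [Bool.and_eq_true, decide_eq_true_eq]; rw [okB_iff]; omega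
        · by_cases hYm : Y < m
          · refine ⟨("r", X, Y + 1), by simp, ?_⟩
            simp only [Bool.and_eq_true, decide_eq_true_eq]; rw [okB_iff]; omega
          · refine ⟨("l", X, Y - 1), by simp, ?_⟩
            simp only [Bool.and_eq_true, decide_eq_true_eq]; rw [okB_iff]; omega
    · refine ⟨("l", X, Y - 1), by simp, ?_⟩
      simp only [Bool.and_eq_true, decide_eq_true_eq]; rw [okB_iff]; omega
  · refine ⟨("u", X - 1, Y), by simp, ?_⟩
    simp only [Bool.and_eq_true, decide_eq_true_eq]; rw [okB_iff]; omega

lemma pvGd_isSome_iff (n m r c : Int) (htb : 0 < r ∧ r ≤ n ∧ 0 < c ∧ c ≤ m) :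
    ∀ (rem : Nat) (X Y : Int) (acc : String), 0 < X ∧ X ≤ n ∧ 0 < Y ∧ Y ≤ m →
    (pvGd n m r c rem X Y acc).isSome = pvOkB n m r c X Y rem := by
  intro rem
  induction rem with
  | zero =>
    intro X Y acc hb
    rw [pvGd]
    by_cases h : X = r ∧ Y = c
    · simp only [if_pos h, Option.isSome_some]
      symm; rw [show ((0:Nat):Int) = 0 by norm_num, okB_iff]; omega
    · simp only [if_neg h, Option.isSome_none]
      symm; rw [← Bool.not_eq_true, show ((0:Nat):Int) = 0 by norm_num, okB_iff]; omega
  | succ rem ih =>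
    intro X Y acc hb
    rw [pvGd]
    cases h : [("d", X + 1, Y), ("l", X, Y - 1), ("r", X, Y + 1), ("u", X - 1, Y)].find?
        (fun t => decide (0 < t.2.1 ∧ t.2.1 ≤ n ∧ 0 < t.2.2 ∧ t.2.2 ≤ m) &&
                  pvOkB n m r c t.2.1 t.2.2 ((rem : Nat))) with
    | none =>
      simp only [Option.isSome_none]
      cases hok : pvOkB n m r c X Y ((rem + 1 : Nat)) with
      | false => rfl
      | true =>
        exfalso
        have hok' : pvOkB n m r c X Y ((rem : Int) + 1) = true := by
          rw [show ((rem : Int) + 1) = ((rem + 1 : Nat) : Int) by push_cast; ring]; exact hok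
        obtain ⟨t, hmem, hp⟩ := childStep n m r c X Y rem htb hb hok'
        exact absurd hp (by simpa using List.find?_eq_none.mp h t hmem)
    | some t =>
      have hp := List.find?_some h
      simp only [Bool.and_eq_true, decide_eq_true_eq] at hp
      have hmem := List.mem_of_find?_eq_some h
      show (pvGd n m r c rem t.2.1 t.2.2 (acc ++ t.1)).isSome = _
      rw [ih t.2.1 t.2.2 (acc ++ t.1) hp.1, hp.2]
      symm
      have hok := hp.2
      rw [okB_iff] at hok
      rw [show ((rem + 1 : Nat) : Int) = (rem : Int) + 1 by push_cast; ring, okB_iff]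
      have hbb := hp.1
      simp only [List.mem_cons, List.not_mem_nil, or_false] at hmem
      rcases hmem with rfl | rfl | rfl | rfl <;> (dsimp only at hok hbb ⊢; omega)
lemma foldl_pvDfsA_flag (n m r c k : Int) (fuel : Nat) (X Y deep : Int) (path : String) :
    ∀ (L : List (Int × Int × String)) (l : List String),
    L.foldl (fun s p => if 0 < X + p.1 ∧ X + p.1 ≤ n ∧ 0 < Y + p.2.1 ∧ Y + p.2.1 ≤ m then
      pvDfsA n m r c k fuel (X + p.1) (Y + p.2.1) deep (path ++ p.2.2) s else s) (l, true) = (l, true) := by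
  intro L
  induction L with
  | nil => intro l; rfl
  | cons p L ihL =>
    intro l
    rw [List.foldl_cons]
    have hstep : (if 0 < X + p.1 ∧ X + p.1 ≤ n ∧ 0 < Y + p.2.1 ∧ Y + p.2.1 ≤ m then
        pvDfsA n m r c k fuel (X + p.1) (Y + p.2.1) deep (path ++ p.2.2) ((l, true) : List String × Bool) else (l, true)) = (l, true) := by
      by_cases hb : 0 < X + p.1 ∧ X + p.1 ≤ n ∧ 0 < Y + p.2.1 ∧ Y + p.2.1 ≤ m
      · rw [if_pos hb]; exact pvDfsA_flag n m r c k fuel (X + p.1) (Y + p.2.1) deep (path ++ p.2.2) l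
      · rw [if_neg hb]
    rw [hstep]; exact ihL l

lemma pvDfsA_eq_gd (n m r c k : Int) (htb : 0 < r ∧ r ≤ n ∧ 0 < c ∧ c ≤ m) :
    ∀ (rem : Nat) (X Y : Int) (path : String),
    pvDfsA n m r c k (rem + 1) X Y (k - rem) path ([], false) =
      (match pvGd n m r c rem X Y path with
       | some g => ([g], true)
       | none => ([], false)) := by
  intro rem
  induction rem with
  | zero =>
    intro X Y path
    have e : k - ((0:Nat):Int) = k := by norm_num
    rw [pvDfsA, pvGd, e]
    simp only [Int.abs_eq_natAbs]
    by_cases h : X = r ∧ Y = c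
    · obtain ⟨rfl, rfl⟩ := h
      simp
    · rw [if_neg h, if_pos (Or.inr (by omega : k < ((X - r).natAbs : Int) + ((Y - c).natAbs : Int) + k))]
      rw [if_neg h]
  | succ rem ih =>
    intro X Y path
    have ecast : k - ((rem + 1 : Nat) : Int) = k - ((rem : Int) + 1) := by push_cast; ring
    rw [pvDfsA, pvGd, ecast]
    simp only [Int.abs_eq_natAbs]
    by_cases hfar : (rem : Int) + 1 < ((X - r).natAbs : Int) + ((Y - c).natAbs : Int)
    · rw [if_pos (Or.inr (by omega : k < ((X - r).natAbs : Int) + ((Y - c).natAbs : Int) + (k - ((rem : Int) + 1))))]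
      have hfind : [("d", X + 1, Y), ("l", X, Y - 1), ("r", X, Y + 1), ("u", X - 1, Y)].find?
          (fun t => decide (0 < t.2.1 ∧ t.2.1 ≤ n ∧ 0 < t.2.2 ∧ t.2.2 ≤ m) &&
                    pvOkB n m r c t.2.1 t.2.2 ((rem : Nat))) = none := by
        rw [List.find?_eq_none]
        intro t hmem
        simp only [List.mem_cons, List.not_mem_nil, or_false] at hmem
        rcases hmem with rfl | rfl | rfl | rfl <;>
          (simp only [Bool.and_eq_true, decide_eq_true_eq, not_and]
           intro _
           rw [okB_iff]
           omega)
      rw [hfind]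
    · rw [if_neg (not_or.mpr ⟨by simp, by omega⟩),
          if_neg (by omega : ¬ (k - ((rem : Int) + 1) = k))]
      have edeep : k - ((rem : Int) + 1) + 1 = k - (rem : Int) := by ring
      simp only [edeep]
      have hgen : ∀ (L : List (Int × Int × String)),
          L.foldl (fun s p => if 0 < X + p.1 ∧ X + p.1 ≤ n ∧ 0 < Y + p.2.1 ∧ Y + p.2.1 ≤ m then
              pvDfsA n m r c k (rem + 1) (X + p.1) (Y + p.2.1) (k - (rem : Int)) (path ++ p.2.2) s else s) ([], false)
          = match (L.map (fun p => (p.2.2, X + p.1, Y + p.2.1))).find?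
                (fun t => decide (0 < t.2.1 ∧ t.2.1 ≤ n ∧ 0 < t.2.2 ∧ t.2.2 ≤ m) &&
                          pvOkB n m r c t.2.1 t.2.2 ((rem : Nat))) with
            | some t => (match pvGd n m r c rem t.2.1 t.2.2 (path ++ t.1) with
                         | some g => ([g], true)
                         | none => ([], false))
            | none => ([], false) := by
        intro L
        induction L with
        | nil => rfl
        | cons p L ihL =>
          rw [List.foldl_cons, List.map_cons]
          by_cases hbp : 0 < X + p.1 ∧ X + p.1 ≤ n ∧ 0 < Y + p.2.1 ∧ Y + p.2.1 ≤ m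
          · rw [if_pos hbp]
            have hrec := ih (X + p.1) (Y + p.2.1) (path ++ p.2.2)
            have hsome := pvGd_isSome_iff n m r c htb rem (X + p.1) (Y + p.2.1) (path ++ p.2.2) hbp
            cases hG : pvGd n m r c rem (X + p.1) (Y + p.2.1) (path ++ p.2.2) with
            | some g =>
              rw [hG] at hrec
              rw [hrec, foldl_pvDfsA_flag]
              have hok : pvOkB n m r c (X + p.1) (Y + p.2.1) ((rem : Nat)) = true := by
                rw [← hsome, hG]; rfl
              rw [List.find?_cons_of_pos]
              · dsimp only; rw [hG]
              · dsimp only; simp [hbp, hok]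
            | none =>
              rw [hG] at hrec
              rw [hrec]
              have hok : pvOkB n m r c (X + p.1) (Y + p.2.1) ((rem : Nat)) = false := by
                rw [← hsome, hG]; rfl
              rw [List.find?_cons_of_neg]
              · exact ihL
              · dsimp only; simp [hok]
          · rw [if_neg hbp]
            rw [List.find?_cons_of_neg]
            · exact ihL
            · dsimp only; simp [hbp]
      rw [hgen pvDirsA]
      dsimp only [pvDirsA, List.map_cons, List.map_nil]
      simp only [add_zero, ← sub_eq_add_neg]
      cases hf : [("d", X + 1, Y), ("l", X, Y - 1), ("r", X, Y + 1), ("u", X - 1, Y)].find?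
          (fun t => decide (0 < t.2.1 ∧ t.2.1 ≤ n ∧ 0 < t.2.2 ∧ t.2.2 ≤ m) &&
                    pvOkB n m r c t.2.1 t.2.2 ((rem : Nat))) with
      | none => rfl
      | some t => cases pvGd n m r c rem t.2.1 t.2.2 (path ++ t.1) <;> rfl
lemma pvDfsA_no_target (n m r c k : Int) (hnt : ¬(0 < r ∧ r ≤ n ∧ 0 < c ∧ c ≤ m)) :
    ∀ (rem : Nat) (X Y : Int) (path : String), (rem = 0 → 0 < X ∧ X ≤ n ∧ 0 < Y ∧ Y ≤ m) →
    pvDfsA n m r c k (rem + 1) X Y (k - rem) path ([], false) = ([], false) := by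
  intro rem
  induction rem with
  | zero =>
    intro X Y path hb0
    have hb := hb0 rfl
    have e : k - ((0:Nat):Int) = k := by norm_num
    rw [pvDfsA, e]
    simp only [Int.abs_eq_natAbs]
    by_cases h : X = r ∧ Y = c
    · exact absurd (by obtain ⟨rfl, rfl⟩ := h; exact hb) hnt
    · rw [if_pos (Or.inr (by omega : k < ((X - r).natAbs : Int) + ((Y - c).natAbs : Int) + k))]
  | succ rem ih =>
    intro X Y path _
    have ecast : k - ((rem + 1 : Nat) : Int) = k - ((rem : Int) + 1) := by push_cast; ring
    rw [pvDfsA, ecast]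
    simp only [Int.abs_eq_natAbs]
    by_cases hz : ((([] : List String), false).2 = true ∨ k < ((X - r).natAbs : Int) + ((Y - c).natAbs : Int) + (k - ((rem : Int) + 1)))
    · rw [if_pos hz]
    · rw [if_neg hz, if_neg (by omega : ¬ (k - ((rem : Int) + 1) = k))]
      have edeep : k - ((rem : Int) + 1) + 1 = k - (rem : Int) := by ring
      simp only [edeep]
      have hgen : ∀ (L : List (Int × Int × String)),
          L.foldl (fun s p => if 0 < X + p.1 ∧ X + p.1 ≤ n ∧ 0 < Y + p.2.1 ∧ Y + p.2.1 ≤ m then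
              pvDfsA n m r c k (rem + 1) (X + p.1) (Y + p.2.1) (k - (rem : Int)) (path ++ p.2.2) s else s) ([], false) = ([], false) := by
        intro L
        induction L with
        | nil => rfl
        | cons p L ihL =>
          rw [List.foldl_cons]
          by_cases hbp : 0 < X + p.1 ∧ X + p.1 ≤ n ∧ 0 < Y + p.2.1 ∧ Y + p.2.1 ≤ m
          · rw [if_pos hbp, ih (X + p.1) (Y + p.2.1) (path ++ p.2.2) (fun _ => hbp)]
            exact ihL
          · rw [if_neg hbp]; exact ihL
      exact hgen pvDirsA


-- ===== VERDICT (by name: the statement is the Claim_ definition above) =====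
theorem solution_spec : Claim_equal_solution := by
  unfold Claim_equal_solution
  intro n m x y r c k _
  unfold Spec_solution
  simp only [solution, solution_alt, PySem.Int.mod_eq_emod_of_pos (show (0:Int) < 2 by norm_num),
    Int.abs_eq_natAbs]
  by_cases hA : (k - ((x - r).natAbs : Int) + ((y - c).natAbs : Int) < 0 ∨
      (k - ((x - r).natAbs : Int) + ((y - c).natAbs : Int)) % 2 ≠ 0)
  · rw [if_pos hA, if_pos (show k < ((x - r).natAbs : Int) + ((y - c).natAbs : Int) ∨
      (k - (((x - r).natAbs : Int) + ((y - c).natAbs : Int))) % 2 ≠ 0 by omega)]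
  · rw [if_neg hA]
    by_cases hB : k < ((x - r).natAbs : Int) + ((y - c).natAbs : Int)
    · rw [if_pos (Or.inl hB)]
      have hdfs : pvDfsA n m r c k (k.toNat + 1) x y 0 "" ([], false) = ([], false) := by
        rw [pvDfsA]
        rw [if_pos (Or.inr (show k < |x - r| + |y - c| + 0 by
          simp only [Int.abs_eq_natAbs]; omega))]
      rw [hdfs]
    · rw [if_neg (show ¬(k < ((x - r).natAbs : Int) + ((y - c).natAbs : Int) ∨
        (k - (((x - r).natAbs : Int) + ((y - c).natAbs : Int))) % 2 ≠ 0) by omega)]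
      by_cases hk : k = 0
      · subst hk
        rw [if_pos rfl]
        have hx : x = r ∧ y = c := by omega
        obtain ⟨rfl, rfl⟩ := hx
        have hdfs : pvDfsA n m x y (0:Int) ((0:Int).toNat + 1) x y 0 "" ([], false) = ([""], true) := by
          rw [pvDfsA]; simp
        rw [hdfs]
      · rw [if_neg hk]
        have hk0 : 0 < k := by omega
        obtain ⟨K, hK⟩ : ∃ K : Nat, k.toNat = K + 1 := ⟨k.toNat - 1, by omega⟩
        rw [hK]
        have e2 : (0 : Int) = k - ((K + 1 : Nat) : Int) := by omega
        by_cases htb : 0 < r ∧ r ≤ n ∧ 0 < c ∧ c ≤ m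
        · rw [if_neg (not_not_intro htb), e2,
            pvDfsA_eq_gd n m r c k htb (K + 1) x y "",
            pvGd_eq_goB n m r c K x y ""]
          cases pvGoB n m r c (K + 1) x y "" <;> rfl
        · rw [if_pos htb, e2,
            pvDfsA_no_target n m r c k htb (K + 1) x y "" (fun h => absurd h (by omega))]
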